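-- pv_equiv track=rewrite | github.com/Pranav03Arya/agent-chaari | chatbot_backend.py | _extract_city_from_message
-- ===== SOURCE A (Python) =====
-- from typing import Any, Dict, Iterable, List, Optional, Tuple
--
-- CITY_KEY_MAP = {
--     "new delhi": "from_new_delhi",
--     "delhi": "from_new_delhi",
--     "mumbai": "from_mumbai",
--     "bombay": "from_mumbai",
--     "chennai": "from_chennai",
--     "madras": "from_chennai",
--     "kolkata": "from_kolkata",
--     "calcutta": "from_kolkata",
--     "bangalore": "from_bangalore",
--     "bengaluru": "from_bangalore",
-- }
--
-- def _extract_city_from_message(user_message: str) -> Tuple[Optional[str], Optional[str]]: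
--     """
--     Look for a known city phrase in the user message and map it to the
--     appropriate distances_km key (from_new_delhi, from_mumbai, etc).
--
--     Returns (distance_key, pretty_city_label) or (None, None) if nothing matches.
--     Matches longer phrases first to avoid partial matches.
--     """
--     msg_lower = (user_message or "").lower()
--     # Sort by phrase length (longest first) to match "new delhi" before "delhi"
--     sorted_phrases = sorted(CITY_KEY_MAP.items(), key=lambda x: -len(x[0]))
--     for phrase, key in sorted_phrases:
--         if phrase in msg_lower:
--             pretty = phrase.title()
--             # normalise common variants
--             if phrase == "delhi":
--                 pretty = "New Delhi"
--             elif phrase == "bombay":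
--                 pretty = "Mumbai"
--             elif phrase == "madras":
--                 pretty = "Chennai"
--             elif phrase == "bengaluru":
--                 pretty = "Bangalore"
--             return key, pretty
--     return None, None
-- ===== SOURCE B (Python) =====
-- CITY_KEY_MAP = {
--     "new delhi": "from_new_delhi",
--     "delhi": "from_new_delhi",
--     "mumbai": "from_mumbai",
--     "bombay": "from_mumbai",
--     "chennai": "from_chennai",
--     "madras": "from_chennai",
--     "kolkata": "from_kolkata",
--     "calcutta": "from_kolkata",
--     "bangalore": "from_bangalore",
--     "bengaluru": "from_bangalore",
-- }
--
-- def _extract_city_from_message(user_message):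
--     """One pass, no sorting: keep the longest matching phrase (insertion-order
--     tiebreak, since only a strictly longer match replaces the current best)."""
--     msg_lower = (user_message or "").lower()
--     best = None
--     for phrase in CITY_KEY_MAP:
--         if phrase in msg_lower and (best is None or len(phrase) > len(best)):
--             best = phrase
--     if best is None:
--         return (None, None)
--     key = CITY_KEY_MAP[best]
--     if best == "delhi":
--         pretty = "New Delhi"
--     elif best == "bombay":
--         pretty = "Mumbai"
--     elif best == "madras":
--         pretty = "Chennai"
--     elif best == "bengaluru":
--         pretty = "Bangalore"
--     else:
--         pretty = best.title()
--     return (key, pretty)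
-- ===== Notes on version B (the rewrite author's own statement) =====
-- stated objective: simpler
-- what changed: Replaces A's sort of the whole map plus first-match loop with a single best-keeping pass in insertion order (a strictly-longer match replaces the current best, giving the same longest-match/insertion-order tiebreak), then one lookup and the normalization chain.
import Mathlib
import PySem

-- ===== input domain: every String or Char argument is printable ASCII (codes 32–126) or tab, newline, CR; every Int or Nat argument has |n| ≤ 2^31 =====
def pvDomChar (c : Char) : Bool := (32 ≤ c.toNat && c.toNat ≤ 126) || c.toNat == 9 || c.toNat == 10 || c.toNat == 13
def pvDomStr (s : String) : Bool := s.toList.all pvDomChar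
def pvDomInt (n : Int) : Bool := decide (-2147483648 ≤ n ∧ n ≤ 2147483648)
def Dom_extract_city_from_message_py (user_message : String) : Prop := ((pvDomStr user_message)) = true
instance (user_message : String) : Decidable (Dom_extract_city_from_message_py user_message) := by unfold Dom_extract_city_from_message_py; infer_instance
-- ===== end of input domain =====

-- B replaces A's sort-then-first-match with a single best-keeping pass over the map
-- in insertion order (objective: simpler — no sort of the whole map).

-- CITY_KEY_MAP (module constant, insertion order)
def cityKeyMap : List (String × String) :=
  [("new delhi", "from_new_delhi"), ("delhi", "from_new_delhi"),
   ("mumbai", "from_mumbai"), ("bombay", "from_mumbai"),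
   ("chennai", "from_chennai"), ("madras", "from_chennai"),
   ("kolkata", "from_kolkata"), ("calcutta", "from_kolkata"),
   ("bangalore", "from_bangalore"), ("bengaluru", "from_bangalore")]

-- str.title(), hand-ported (PySem has no title); exact on the ASCII domain.
def isAsciiAlpha (c : Char) : Bool := ('a' ≤ c && c ≤ 'z') || ('A' ≤ c && c ≤ 'Z')

def titleAux : List Char → Bool → List Char
  | [], _ => []
  | c :: rest, prevAlpha =>
    if isAsciiAlpha c then
      (if prevAlpha then c.toLower else c.toUpper) :: titleAux rest true
    else c :: titleAux rest false

def pyTitle (s : String) : String := String.ofList (titleAux s.toList false)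

-- ===== PORT A =====
-- A's for-loop over the sorted phrase list (first match returns)
def loopA : List (String × String) → String → Option String × Option String
  | [], _ => (none, none)
  | (phrase, key) :: rest, msgLower =>
    if PySem.Str.isIn phrase msgLower then
      let pretty := pyTitle phrase
      let pretty :=
        if phrase == "delhi" then "New Delhi"
        else if phrase == "bombay" then "Mumbai"
        else if phrase == "madras" then "Chennai"
        else if phrase == "bengaluru" then "Bangalore"
        else pretty
      (some key, some pretty)
    else loopA rest msgLower

def extract_city_from_message_py_core (msg_lower : String) : Option String × Option String :=
  let sorted_phrases := PySem.List.sorted cityKeyMap (fun x => -(PySem.Str.len x.1)) false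
  loopA sorted_phrases msg_lower

def extract_city_from_message_py (user_message : String) : Option String × Option String :=
  extract_city_from_message_py_core (PySem.Str.lower (if user_message == "" then "" else user_message))

-- ===== PORT B =====
-- 'best is None or len(phrase) > len(best)'
def betterB (best : Option String) (phrase : String) : Bool :=
  match best with
  | none => true
  | some b => decide (PySem.Str.len b < PySem.Str.len phrase)

def extract_city_from_message_py_alt_core (msg_lower : String) : Option String × Option String :=
  let best := cityKeyMap.foldl
    (fun best p => if PySem.Str.isIn p.1 msg_lower && betterB best p.1 then some p.1 else best)
    none
  match best with
  | none => (none, none)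
  | some b =>
    -- CITY_KEY_MAP[best]: KeyError unreachable, best is always a key of the map
    let key := ((PySem.Dict.mk cityKeyMap).get? b).getD ""
    let pretty :=
      if b == "delhi" then "New Delhi"
      else if b == "bombay" then "Mumbai"
      else if b == "madras" then "Chennai"
      else if b == "bengaluru" then "Bangalore"
      else pyTitle b
    (some key, some pretty)

def extract_city_from_message_py_alt (user_message : String) : Option String × Option String :=
  extract_city_from_message_py_alt_core (PySem.Str.lower (if user_message == "" then "" else user_message))

-- ===== PRECONDITION & SPEC =====
def Spec_extract_city_from_message_py (user_message : String) (out : Option String × Option String) : Prop := out = extract_city_from_message_py_alt user_message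
instance (user_message : String) (out : Option String × Option String) : Decidable (Spec_extract_city_from_message_py user_message out) := by unfold Spec_extract_city_from_message_py; infer_instance

-- ===== CLAIM (what is proved, stated in full; the proofs are below) =====
def Claim_equal_extract_city_from_message_py : Prop := ∀ (user_message : String), Dom_extract_city_from_message_py user_message → Spec_extract_city_from_message_py user_message (extract_city_from_message_py user_message)

-- ===== LEMMAS AND PROOFS =====

-- Both programs depend on the message only through the ten containment tests.
-- tblA/tblB are those programs as functions of the ten booleans (definitionally
-- equal to the ports' bodies), and their agreement is a finite check.

-- A's sorted loop as a function of the ten tests (order of A's stable length sort)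
def tblA (cnd cde cmu cbo cch cma cko cca cba cbe : Bool) : Option String × Option String :=
  if cnd then (some "from_new_delhi", some "New Delhi")
  else if cba then (some "from_bangalore", some "Bangalore")
  else if cbe then (some "from_bangalore", some "Bangalore")
  else if cca then (some "from_kolkata", some "Calcutta")
  else if cch then (some "from_chennai", some "Chennai")
  else if cko then (some "from_kolkata", some "Kolkata")
  else if cmu then (some "from_mumbai", some "Mumbai")
  else if cbo then (some "from_mumbai", some "Mumbai")
  else if cma then (some "from_chennai", some "Chennai")
  else if cde then (some "from_new_delhi", some "New Delhi")
  else (none, none)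

-- B's single pass as a function of the ten tests (insertion order, same fold)
def tblB (cnd cde cmu cbo cch cma cko cca cba cbe : Bool) : Option String × Option String :=
  match [(cnd, "new delhi"), (cde, "delhi"), (cmu, "mumbai"), (cbo, "bombay"),
         (cch, "chennai"), (cma, "madras"), (cko, "kolkata"), (cca, "calcutta"),
         (cba, "bangalore"), (cbe, "bengaluru")].foldl
      (fun best p => if p.1 && betterB best p.2 then some p.2 else best) none with
  | none => (none, none)
  | some b =>
    let key := ((PySem.Dict.mk cityKeyMap).get? b).getD ""
    let pretty :=
      if b == "delhi" then "New Delhi"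
      else if b == "bombay" then "Mumbai"
      else if b == "madras" then "Chennai"
      else if b == "bengaluru" then "Bangalore"
      else pyTitle b
    (some key, some pretty)

theorem A_eq_tbl (m : String) :
    extract_city_from_message_py_core m =
    tblA (PySem.Str.isIn "new delhi" m) (PySem.Str.isIn "delhi" m)
      (PySem.Str.isIn "mumbai" m) (PySem.Str.isIn "bombay" m)
      (PySem.Str.isIn "chennai" m) (PySem.Str.isIn "madras" m)
      (PySem.Str.isIn "kolkata" m) (PySem.Str.isIn "calcutta" m)
      (PySem.Str.isIn "bangalore" m) (PySem.Str.isIn "bengaluru" m) := rfl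

theorem B_eq_tbl (m : String) :
    extract_city_from_message_py_alt_core m =
    tblB (PySem.Str.isIn "new delhi" m) (PySem.Str.isIn "delhi" m)
      (PySem.Str.isIn "mumbai" m) (PySem.Str.isIn "bombay" m)
      (PySem.Str.isIn "chennai" m) (PySem.Str.isIn "madras" m)
      (PySem.Str.isIn "kolkata" m) (PySem.Str.isIn "calcutta" m)
      (PySem.Str.isIn "bangalore" m) (PySem.Str.isIn "bengaluru" m) := rfl

theorem tbl_eq : ∀ cnd cde cmu cbo cch cma cko cca cba cbe : Bool,
    tblA cnd cde cmu cbo cch cma cko cca cba cbe =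
    tblB cnd cde cmu cbo cch cma cko cca cba cbe := by decide

-- ===== VERDICT (by name: the statement is the Claim_ definition above) =====
theorem extract_city_from_message_py_spec : Claim_equal_extract_city_from_message_py := by
  intro user_message _
  unfold Spec_extract_city_from_message_py
  show extract_city_from_message_py_core _ = extract_city_from_message_py_alt_core _
  rw [A_eq_tbl, B_eq_tbl, tbl_eq]
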